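-- pv_equiv track=rewrite | github.com/PSurovenko1991/partial_translate | main.py | get_index_tw
-- ===== SOURCE A (Python) =====
-- def get_index_tw(s,s1):  # s - top_word, s1 - normform - запоминаем индексы наиболее часто встречающихся элементов
--     s2 =[]
--     for i in range(len(s)):
--         s2.append([s[i][0]])
--         for j in range(len(s1)):
--             if s[i][0] == s1[j]:
--                 s2[i].append(j)
--     return s2 # индексы наиболее часто встречающихся слов
-- ===== SOURCE B (Python) =====
-- def get_index_tw(s, s1):
--     idx = {}
--     for j, v in enumerate(s1):
--         idx.setdefault(v, []).append(j)
--     return [[w[0]] + idx.get(w[0], []) for w in s]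
-- ===== Notes on version B (the rewrite author's own statement) =====
-- stated objective: faster
-- what changed: B builds a value-to-index-list dict over s1 in one pass and answers each word by a single lookup, replacing A's rescans of s1 for every word.
import Mathlib
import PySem

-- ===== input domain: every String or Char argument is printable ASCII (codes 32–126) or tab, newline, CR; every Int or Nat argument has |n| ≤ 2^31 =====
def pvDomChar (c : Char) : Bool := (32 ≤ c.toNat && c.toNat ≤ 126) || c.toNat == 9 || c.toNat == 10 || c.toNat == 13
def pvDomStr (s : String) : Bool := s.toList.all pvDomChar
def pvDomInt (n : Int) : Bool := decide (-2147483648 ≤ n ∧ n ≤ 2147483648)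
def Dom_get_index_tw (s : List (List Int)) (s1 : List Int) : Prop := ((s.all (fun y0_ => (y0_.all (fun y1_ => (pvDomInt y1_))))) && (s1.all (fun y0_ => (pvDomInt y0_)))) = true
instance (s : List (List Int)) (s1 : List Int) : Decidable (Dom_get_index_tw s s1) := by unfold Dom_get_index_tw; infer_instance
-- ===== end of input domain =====

-- B replaces A's per-word rescan of s1 by a dict from value to its index list built once; return value only.

-- ===== PORT A =====
-- for each word: start the row with s[i][0], then scan all of s1 appending matching indices
def get_index_tw (s : List (List Int)) (s1 : List Int) : List (List Int) :=
  s.foldl (fun s2 w =>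
    s2 ++ [(PySem.List.enumerate s1).foldl
            (fun row jv => if w.headI = jv.2 then row ++ [jv.1] else row) [w.headI]]) []

-- ===== PORT B =====
-- one pass over enumerate(s1): idx.setdefault(v, []).append(j)
def pvBuildIdx (s1 : List Int) : PySem.Dict Int (List Int) :=
  (PySem.List.enumerate s1).foldl
    (fun d jv => d.insert jv.2 (d.getD jv.2 [] ++ [jv.1])) (PySem.Dict.mk [])

def get_index_tw_alt (s : List (List Int)) (s1 : List Int) : List (List Int) :=
  let idx := pvBuildIdx s1
  s.map (fun w => w.headI :: idx.getD w.headI [])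

-- ===== PRECONDITION & SPEC =====
-- Pre_ excludes an empty inner list in s: there s[i][0] raises IndexError in A (and w[0] in B).
def Pre_get_index_tw (s : List (List Int)) (s1 : List Int) : Prop := ∀ w ∈ s, w ≠ []
instance (s : List (List Int)) (s1 : List Int) : Decidable (Pre_get_index_tw s s1) := by unfold Pre_get_index_tw; infer_instance

def pvWitness_get_index_tw : List (List Int) × List Int := ([[1], [2, 3]], [2, 1, 1])

def Spec_get_index_tw (s : List (List Int)) (s1 : List Int) (out : List (List Int)) : Prop := out = get_index_tw_alt s s1
instance (s : List (List Int)) (s1 : List Int) (out : List (List Int)) : Decidable (Spec_get_index_tw s s1 out) := by unfold Spec_get_index_tw; infer_instance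

-- ===== CLAIM (what is proved, stated in full; the proofs are below) =====
def Claim_equal_get_index_tw : Prop := ∀ (s : List (List Int)) (s1 : List Int), Dom_get_index_tw s s1 → Pre_get_index_tw s s1 → Spec_get_index_tw s s1 (get_index_tw s s1)

-- ===== LEMMAS AND PROOFS =====

-- the dict built by B, looked up at v, yields exactly the first components of the matching pairs
theorem pv_getD_buildIdx (l : List (Int × Int)) (d : PySem.Dict Int (List Int)) (v : Int) :
    (l.foldl (fun d jv => d.insert jv.2 (d.getD jv.2 [] ++ [jv.1])) d).getD v []
      = d.getD v [] ++ (l.filter (fun jv => decide (v = jv.2))).map (·.1) := by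
  induction l generalizing d with
  | nil => simp
  | cons jv t ih =>
    simp only [List.foldl_cons, ih, List.filter_cons]
    rw [PySem.Dict.getD_insert]
    by_cases h : v = jv.2
    · subst h; simp
    · simp [h]

theorem pv_rowA (l : List (Int × Int)) (acc : List Int) (v : Int) :
    l.foldl (fun row jv => if v = jv.2 then row ++ [jv.1] else row) acc
      = acc ++ (l.filter (fun jv => decide (v = jv.2))).map (·.1) := by
  induction l generalizing acc with
  | nil => simp
  | cons jv t ih =>
    simp only [List.foldl_cons, List.filter_cons]
    by_cases h : v = jv.2
    · rw [if_pos h, ih]; simp [h]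
    · rw [if_neg h, ih]; simp [h]

-- ===== VERDICT (by name: the statement is the Claim_ definition above) =====
theorem get_index_tw_spec : Claim_equal_get_index_tw := by
  intro s s1 _ _
  unfold Spec_get_index_tw get_index_tw get_index_tw_alt pvBuildIdx
  rw [PySem.List.foldl_append_singleton_eq_map]
  simp only [List.nil_append]
  apply List.map_congr_left
  intro w _
  rw [pv_rowA, pv_getD_buildIdx]
  simp [PySem.Dict.getD, PySem.Dict.get?]
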